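-- pv_equiv track=rewrite | github.com/tmfrlrkvlek/algorithm_python | Programmers/Python/64064.py | banned_id_list
-- ===== SOURCE A (Python) =====
-- def banned_id_list(user_id, banned_id) :
--     result = []
--     for id in range(len(user_id)) :
--         if len(user_id[id]) != len(banned_id) :
--             continue
--         isFit = True
--         for idx in range(len(banned_id)) :
--             if banned_id[idx] != "*" and banned_id[idx] != user_id[id][idx] :
--                 isFit = False
--                 break
--         if isFit : result.append(id)
--     return result
-- ===== SOURCE B (Python) =====
-- def banned_id_list(user_id, banned_id):
--     def match(p, s):
--         if not p:
--             return not s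
--         if not s:
--             return False
--         return (p[0] == '*' or p[0] == s[0]) and match(p[1:], s[1:])
--     return [i for i, uid in enumerate(user_id) if match(banned_id, uid)]
-- ===== Notes on version B (the rewrite author's own statement) =====
-- stated objective: alternative
-- what changed: Replaces A's explicit length check plus indexed inner loop with flag/break by a recursive matcher that consumes the pattern and the candidate string one character at a time (length equality is implicit: the recursion succeeds only if both are exhausted together), selecting indices with an enumerate comprehension.
import Mathlib
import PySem

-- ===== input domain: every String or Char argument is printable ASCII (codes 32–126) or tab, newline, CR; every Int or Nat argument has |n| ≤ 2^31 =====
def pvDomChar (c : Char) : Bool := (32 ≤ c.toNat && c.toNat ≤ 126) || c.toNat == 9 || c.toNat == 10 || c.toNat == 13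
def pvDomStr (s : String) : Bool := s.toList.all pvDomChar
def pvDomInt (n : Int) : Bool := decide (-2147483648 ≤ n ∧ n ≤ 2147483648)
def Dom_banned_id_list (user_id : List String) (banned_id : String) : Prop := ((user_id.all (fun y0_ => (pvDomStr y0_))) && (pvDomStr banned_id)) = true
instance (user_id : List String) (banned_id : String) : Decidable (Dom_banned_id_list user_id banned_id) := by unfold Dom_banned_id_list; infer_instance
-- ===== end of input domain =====

-- B replaces A's explicit length check + indexed inner loop with flag/break by a
-- recursive char-by-char matcher (length equality implicit in the recursion) over an
-- enumerate comprehension (alternative decomposition, same asymptotic cost).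

-- ===== PORT A =====
-- inner 'for idx in range(len(banned_id))' loop with its break:
-- indices come from range, so they are in bounds and pyGetD with a default is exact here
def bilInner (b u : List Char) : List Int → Bool
  | [] => true
  | idx :: rest =>
      if PySem.List.pyGetD b idx ' ' ≠ '*' ∧ PySem.List.pyGetD b idx ' ' ≠ PySem.List.pyGetD u idx ' '
      then false
      else bilInner b u rest

def banned_id_list (user_id : List String) (banned_id : String) : List Int :=
  (PySem.List.pyRange 0 (user_id.length : Int) 1).foldl (fun result id =>
    let u := (PySem.List.pyGetD user_id id "").toList
    if u.length ≠ banned_id.toList.length then result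
    else if bilInner banned_id.toList u (PySem.List.pyRange 0 (banned_id.toList.length : Int) 1)
      then result ++ [id] else result) []

-- ===== PORT B =====
-- Source B's recursive 'match(p, s)': empty pattern matches only the empty string,
-- otherwise first characters must fit and the tails must match
def bilMatch : List Char → List Char → Bool
  | [], s => s.isEmpty
  | _ :: _, [] => false
  | p :: ps, c :: cs => (p == '*' || p == c) && bilMatch ps cs

def banned_id_list_alt (user_id : List String) (banned_id : String) : List Int :=
  (PySem.List.enumerate user_id).filterMap (fun pr =>
    if bilMatch banned_id.toList pr.2.toList then some pr.1 else none)

-- ===== PRECONDITION & SPEC =====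
def Spec_banned_id_list (user_id : List String) (banned_id : String) (out : List Int) : Prop := out = banned_id_list_alt user_id banned_id
instance (user_id : List String) (banned_id : String) (out : List Int) : Decidable (Spec_banned_id_list user_id banned_id out) := by unfold Spec_banned_id_list; infer_instance

-- ===== CLAIM =====
def Claim_equal_banned_id_list : Prop := ∀ (user_id : List String) (banned_id : String), Dom_banned_id_list user_id banned_id → Spec_banned_id_list user_id banned_id (banned_id_list user_id banned_id)

-- ===== LEMMAS AND PROOFS =====

-- A's inner break-loop is the short-circuit 'all' over the same indices
theorem bilInner_eq_all (b u : List Char) (l : List Int) :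
    bilInner b u l = l.all (fun i =>
      PySem.List.pyGetD b i ' ' == '*' || PySem.List.pyGetD b i ' ' == PySem.List.pyGetD u i ' ') := by
  induction l with
  | nil => rfl
  | cons x xs ih =>
      simp only [bilInner, List.all_cons, ih]
      by_cases h1 : PySem.List.pyGetD b x ' ' = '*' <;>
        by_cases h2 : PySem.List.pyGetD b x ' ' = PySem.List.pyGetD u x ' ' <;>
        simp [h1, h2]

-- B's recursive matcher = length equality plus the positional condition at every index
theorem bilMatch_eq (b : List Char) : ∀ u : List Char,
    bilMatch b u = (decide (u.length = b.length) &&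
      (List.range b.length).all (fun k => b.getD k ' ' == '*' || b.getD k ' ' == u.getD k ' ')) := by
  induction b with
  | nil =>
      intro u
      cases u <;> simp [bilMatch]
  | cons p ps ih =>
      intro u
      cases u with
      | nil => simp [bilMatch]
      | cons c cs =>
          simp only [bilMatch, ih cs, List.length_cons]
          rw [List.range_succ_eq_map]
          simp only [List.all_cons, List.all_map, Function.comp_def, Nat.succ_eq_add_one,
            List.getD_cons_zero, List.getD_cons_succ]
          by_cases hlen : cs.length = ps.length <;> simp [hlen]

-- an append-if foldl is an appended filterMap
theorem foldl_eq_filterMap {α β : Type} (f : α → Option β) (g : List β → α → List β)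
    (hg : ∀ acc x, g acc x = acc ++ (f x).toList) :
    ∀ (l : List α) (acc : List β), l.foldl g acc = acc ++ l.filterMap f := by
  intro l
  induction l with
  | nil => simp
  | cons x xs ih =>
      intro acc
      rw [List.foldl_cons, ih, hg, List.filterMap_cons]
      cases f x <;> simp

-- A's per-element step equals appending B's per-element optional index
theorem step_eq (b u : List Char) (acc : List Int) (i : Int) :
    (if u.length ≠ b.length then acc
     else if bilInner b u (PySem.List.pyRange 0 (b.length : Int) 1) then acc ++ [i] else acc)
    = acc ++ (if bilMatch b u then some i else (none : Option Int)).toList := by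
  rw [bilMatch_eq, bilInner_eq_all, PySem.List.pyRange_one]
  simp only [Int.sub_zero, Int.toNat_natCast, List.all_map, Int.zero_add,
    Function.comp_def, PySem.List.pyGetD_natCast]
  by_cases hlen : u.length = b.length
  · rw [if_neg (by omega : ¬ u.length ≠ b.length)]
    simp only [hlen, decide_true, Bool.true_and]
    cases hc : (List.range b.length).all
        (fun k => b.getD k ' ' == '*' || b.getD k ' ' == u.getD k ' ') <;>
      simp [hc]
  · rw [if_pos hlen]
    simp [hlen]

-- ===== VERDICT =====
theorem banned_id_list_spec : Claim_equal_banned_id_list := by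
  intro user_id banned_id _
  unfold Spec_banned_id_list banned_id_list banned_id_list_alt
  rw [PySem.List.enumerate_eq_map_pyRange user_id "", List.filterMap_map]
  rw [foldl_eq_filterMap _ _
    (fun acc i => step_eq banned_id.toList (PySem.List.pyGetD user_id i "").toList acc i)]
  simp
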